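-- pv_equiv track=rewrite | github.com/SirPoko/Lexer-Poko | lexerPoko.py | msigasig
-- ===== SOURCE A (Python) =====
-- ESTADO_FINAL = "ESTADO FINAL"
--
-- ESTADO_NO_FINAL = "NO ACEPTADO"
--
-- ESTADO_TRAMPA = "EN ESTADO TRAMPA"
--
-- def msigasig(cadena):
--     estado = 0
--     estados_aceptados = [2]
--     delta = {0:{':':1}, 1:{'=':2}, 2:{}}
--     for caracter in cadena:
--         if caracter in delta[estado].keys():
--             estado = delta[estado][caracter]
--         else:
--             estado = -1
--             break
--     if estado == -1:
--         return ESTADO_TRAMPA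
--     if estado in estados_aceptados:
--         return ESTADO_FINAL
--     else:
--         return ESTADO_NO_FINAL
-- ===== SOURCE B (Python) =====
-- ESTADO_FINAL = "ESTADO FINAL"
-- ESTADO_NO_FINAL = "NO ACEPTADO"
-- ESTADO_TRAMPA = "EN ESTADO TRAMPA"
--
-- def msigasig(cadena):
--     if cadena == ":=":
--         return ESTADO_FINAL
--     if ":=".startswith(cadena):
--         return ESTADO_NO_FINAL
--     return ESTADO_TRAMPA
-- ===== Notes on version B (the rewrite author's own statement) =====
-- stated objective: simpler
-- what changed: Replaces the DFA state/transition-table loop with a closed-form comparison: an exact match of the token is accepted, a proper prefix of the token is not-final, everything else is trap.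
import Mathlib
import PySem

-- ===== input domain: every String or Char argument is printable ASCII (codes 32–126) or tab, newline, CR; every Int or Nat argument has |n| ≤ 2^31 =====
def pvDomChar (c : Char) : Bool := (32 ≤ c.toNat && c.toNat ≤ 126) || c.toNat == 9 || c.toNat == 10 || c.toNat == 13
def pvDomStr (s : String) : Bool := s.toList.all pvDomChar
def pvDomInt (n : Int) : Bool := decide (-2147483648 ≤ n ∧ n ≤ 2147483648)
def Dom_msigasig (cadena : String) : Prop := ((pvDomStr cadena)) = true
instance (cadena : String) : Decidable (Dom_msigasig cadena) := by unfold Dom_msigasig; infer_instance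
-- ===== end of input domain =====

-- B replaces the DFA transition-table loop by a closed-form comparison against the token (objective: simpler).

-- ===== PORT A =====
-- delta[estado].get(caracter): the transition table of A, as a function
def msigasigDelta (estado : Int) (caracter : Char) : Option Int :=
  if estado = 0 then (if caracter = ':' then some 1 else none)
  else if estado = 1 then (if caracter = '=' then some 2 else none)
  else none

-- the for-loop over cadena: break-on-missing-transition becomes returning -1
def msigasigLoop (estado : Int) : List Char → Int
  | [] => estado
  | caracter :: rest =>
      match msigasigDelta estado caracter with
      | some e => msigasigLoop e rest
      | none => -1

def msigasig (cadena : String) : String :=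
  let estado := msigasigLoop 0 cadena.toList
  if estado = -1 then "EN ESTADO TRAMPA"
  else if estado = 2 then "ESTADO FINAL"
  else "NO ACEPTADO"

-- ===== PORT B =====
def msigasig_alt (cadena : String) : String :=
  if cadena = ":=" then "ESTADO FINAL"
  else if PySem.Str.startswith ":=" cadena then "NO ACEPTADO"
  else "EN ESTADO TRAMPA"

-- ===== PRECONDITION & SPEC =====
def Spec_msigasig (cadena : String) (out : String) : Prop := out = msigasig_alt cadena
instance (cadena : String) (out : String) : Decidable (Spec_msigasig cadena out) := by unfold Spec_msigasig; infer_instance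

-- ===== CLAIM (what is proved, stated in full; the proofs are below) =====
def Claim_equal_msigasig : Prop := ∀ (cadena : String), Dom_msigasig cadena → Spec_msigasig cadena (msigasig cadena)

-- ===== LEMMAS AND PROOFS =====

theorem msigasig_startswith (cadena : String) :
    PySem.Str.startswith ":=" cadena = true ↔ cadena = "" ∨ cadena = ":" ∨ cadena = ":=" := by
  simp only [PySem.Str.startswith_eq, PySem.Chars.startswith_iff]
  constructor
  · intro h
    obtain ⟨t, ht⟩ := h
    have : cadena.toList = [] ∨ cadena.toList = [':'] ∨ cadena.toList = [':', '='] := by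
      match hc : cadena.toList, t with
      | [], _ => exact Or.inl rfl
      | [c], t =>
        rw [hc] at ht; simp at ht
        exact Or.inr (Or.inl (by simp [ht.1]))
      | [c, d], t =>
        rw [hc] at ht
        cases t with
        | nil => simp at ht; exact Or.inr (Or.inr (by simp [ht.1, ht.2]))
        | cons x xs => simp at ht
      | c :: d :: e :: r, t =>
        rw [hc] at ht
        cases t with
        | nil => simp at ht
        | cons x xs => cases xs with
          | nil => simp at ht
          | cons y ys => simp at ht
    rcases this with h | h | h
    · exact Or.inl (by have := congrArg String.ofList h; simpa using this)
    · exact Or.inr (Or.inl (by have := congrArg String.ofList h; simpa using this))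
    · exact Or.inr (Or.inr (by have := congrArg String.ofList h; simpa using this))
  · rintro (rfl | rfl | rfl) <;> decide

theorem msigasigLoop_two (r : List Char) : msigasigLoop 2 r = if r = [] then 2 else -1 := by
  cases r <;> simp [msigasigLoop, msigasigDelta]

theorem msigasigLoop_zero (l : List Char) :
    msigasigLoop 0 l =
      if l = [] then 0 else if l = [':'] then 1 else if l = [':', '='] then 2 else -1 := by
  match l with
  | [] => simp [msigasigLoop]
  | c :: rest =>
    by_cases hc : c = ':'
    · subst hc
      match rest with
      | [] => simp [msigasigLoop, msigasigDelta]
      | d :: rest' =>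
        by_cases hd : d = '='
        · subst hd
          simp [msigasigLoop, msigasigDelta, msigasigLoop_two]
        · simp [msigasigLoop, msigasigDelta, hd]
    · simp [msigasigLoop, msigasigDelta, hc]

-- ===== VERDICT (by name: the statement is the Claim_ definition above) =====
theorem msigasig_spec : Claim_equal_msigasig := by
  intro cadena _
  unfold Spec_msigasig
  by_cases h2 : cadena = ":="
  · subst h2; decide
  by_cases h0 : cadena = ""
  · subst h0; decide
  by_cases h1 : cadena = ":"
  · subst h1; decide
  have hsw : PySem.Str.startswith ":=" cadena = false := by
    rw [← Bool.not_eq_true, msigasig_startswith]; tauto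
  unfold msigasig msigasig_alt
  rw [if_neg h2, hsw]
  have hl0 : cadena.toList ≠ [] := fun h => h0 (by have := congrArg String.ofList h; simpa using this)
  have hl1 : cadena.toList ≠ [':'] := fun h => h1 (by have := congrArg String.ofList h; simpa using this)
  have hl2 : cadena.toList ≠ [':', '='] := fun h => h2 (by have := congrArg String.ofList h; simpa using this)
  simp [msigasigLoop_zero, hl0, hl1, hl2]
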